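-- pv_equiv track=rewrite | github.com/rchermanteev/my_projects | introductory_in_made_programming_2020/Task A.py | construct_spare_number
-- ===== SOURCE A (Python) =====
-- def iterate_spare_number(sec, len_num):
--     if sec == 1:
--         sec = len_num
--         len_num += 1
--         return sec, len_num
--     elif sec > 1:
--         return sec - 1, len_num
--
-- def construct_spare_number(position):
--     first_1 = 0
--     second_1 = 1
--     len_number = 2
--     sequential_number = 1
--     while sequential_number != position and position != 0:
--         second_1, len_number = iterate_spare_number(second_1, len_number)
--         sequential_number += 1
--     return first_1, second_1, len_number
-- ===== SOURCE B (Python) =====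
-- def construct_spare_number(position):
--     # Binary search for the block: smallest k with k(k+1)/2 >= position,
--     # then read sec and len off the triangular numbers directly.
--     if position == 0:
--         return 0, 1, 2
--     lo, hi = 1, position
--     while lo < hi:
--         mid = (lo + hi) // 2
--         if mid * (mid + 1) // 2 >= position:
--             hi = mid
--         else:
--             lo = mid + 1
--     return 0, lo * (lo + 1) // 2 - position + 1, lo + 1
-- ===== Notes on version B (the rewrite author's own statement) =====
-- stated objective: faster
-- what changed: A steps the (sec, len) countdown state machine one position at a time; B binary-searches the triangular numbers for the block containing the position and computes sec and len directly from it.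
-- outside the precondition, e.g. on construct_spare_number(-1): A does not finish within the time limit, B returns (0, 3, 2)
import Mathlib
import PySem

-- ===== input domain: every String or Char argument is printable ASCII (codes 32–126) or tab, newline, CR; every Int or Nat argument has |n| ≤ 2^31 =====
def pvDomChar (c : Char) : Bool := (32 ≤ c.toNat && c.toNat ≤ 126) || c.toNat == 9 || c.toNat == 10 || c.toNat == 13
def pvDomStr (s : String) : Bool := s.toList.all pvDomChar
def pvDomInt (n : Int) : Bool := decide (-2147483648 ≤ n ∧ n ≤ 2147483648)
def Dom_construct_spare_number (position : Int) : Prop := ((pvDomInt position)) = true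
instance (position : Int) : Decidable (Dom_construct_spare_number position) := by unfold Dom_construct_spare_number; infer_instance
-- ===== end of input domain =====

-- B replaces A's O(position) step-by-step state machine with an O(log position) binary
-- search for the countdown block over triangular numbers (objective: faster).

-- ===== PORT A =====
-- Python: iterate_spare_number; the sec < 1 case returns None in Python (unpacking would
-- raise); it is unreachable for position ≥ 0 (sec ≥ 1 is an invariant), ported as identity.
def iterate_spare_number (sec len_num : Int) : Int × Int :=
  if sec = 1 then (len_num, len_num + 1)
  else if sec > 1 then (sec - 1, len_num)
  else (sec, len_num)

-- Python's while loop, fuel-bounded: position.toNat ≥ the position-1 iterations the loop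
-- performs when position ≥ 1; for position < 0 the Python loop diverges (excluded by Pre_).
def csn_loop (fuel : Nat) (seq sec len position : Int) : Int × Int :=
  match fuel with
  | 0 => (sec, len)
  | f + 1 =>
    if seq ≠ position ∧ position ≠ 0 then
      let t := iterate_spare_number sec len
      csn_loop f (seq + 1) t.1 t.2 position
    else (sec, len)

def construct_spare_number (position : Int) : List Int :=
  let r := csn_loop position.toNat 1 1 2 position
  [0, r.1, r.2]

-- ===== PORT B =====
-- Source B's binary-search loop, fuel-bounded: hi - lo strictly decreases each iteration,
-- so (hi - lo).toNat at entry is enough fuel.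
def csn_bsearch (fuel : Nat) (lo hi position : Int) : Int :=
  match fuel with
  | 0 => lo
  | f + 1 =>
    if lo < hi then
      let mid := PySem.Int.floordiv (lo + hi) 2
      if PySem.Int.floordiv (mid * (mid + 1)) 2 ≥ position then
        csn_bsearch f lo mid position
      else
        csn_bsearch f (mid + 1) hi position
    else lo

def construct_spare_number_alt (position : Int) : List Int :=
  if position = 0 then [0, 1, 2]
  else
    let lo := csn_bsearch (position - 1).toNat 1 position position
    [0, PySem.Int.floordiv (lo * (lo + 1)) 2 - position + 1, lo + 1]

-- ===== PRECONDITION & SPEC =====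
-- For position < 0 the Python while loop never terminates (sequential_number counts up
-- from 1 and never equals a negative position), so A returns on exactly position ≥ 0.
def Pre_construct_spare_number (position : Int) : Prop := 0 ≤ position
instance (position : Int) : Decidable (Pre_construct_spare_number position) := by
  unfold Pre_construct_spare_number; infer_instance
def pvWitness_construct_spare_number : Int := (7)

def Spec_construct_spare_number (position : Int) (out : List Int) : Prop := out = construct_spare_number_alt position
instance (position : Int) (out : List Int) : Decidable (Spec_construct_spare_number position out) := by unfold Spec_construct_spare_number; infer_instance

-- ===== CLAIM (what is proved, stated in full; the proofs are below) =====
def Claim_equal_construct_spare_number : Prop := ∀ (position : Int), Dom_construct_spare_number position → Pre_construct_spare_number position → Spec_construct_spare_number position (construct_spare_number position)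

-- ===== LEMMAS AND PROOFS =====

-- triangular numbers
def tri : Nat → Nat
  | 0 => 0
  | k + 1 => tri k + (k + 1)

theorem tri_succ (k : Nat) : tri (k + 1) = tri k + (k + 1) := rfl

theorem tri_mono : ∀ {j k : Nat}, j ≤ k → tri j ≤ tri k := by
  intro j k h
  induction k with
  | zero =>
    have : j = 0 := by omega
    subst this; exact le_refl _
  | succ n ih =>
    rcases Nat.lt_or_ge j (n + 1) with h' | h'
    · have := ih (by omega); rw [tri_succ]; omega
    · have : j = n + 1 := by omega
      subst this; exact le_refl _

theorem tri_div (n : Nat) : n * (n + 1) / 2 = tri n := by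
  induction n with
  | zero => rfl
  | succ k ih =>
    have h : (k + 1) * (k + 1 + 1) = k * (k + 1) + 2 * (k + 1) := by ring
    rw [tri_succ, ← ih, h]
    omega

theorem tri_ge_self : ∀ k : Nat, k ≤ tri k := by
  intro k
  induction k with
  | zero => simp [tri]
  | succ n ih => rw [tri_succ]; omega

theorem K_ex (p : Int) : ∃ k : Nat, p ≤ (tri k : Int) := by
  by_cases h : p ≤ 0
  · exact ⟨0, by simp [tri]; omega⟩
  · refine ⟨p.toNat, ?_⟩
    have := tri_ge_self p.toNat
    omega

def K (p : Int) : Nat := Nat.find (K_ex p)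

theorem K_spec (p : Int) : p ≤ (tri (K p) : Int) := Nat.find_spec (K_ex p)

theorem K_min (p : Int) {j : Nat} (h : j < K p) : (tri j : Int) < p := by
  have := Nat.find_min (K_ex p) h
  omega

theorem K_le (p : Int) {k : Nat} (h : p ≤ (tri k : Int)) : K p ≤ k :=
  Nat.find_le h

theorem K_eq (p : Int) {k : Nat} (h1 : p ≤ (tri k : Int))
    (h2 : ∀ j < k, (tri j : Int) < p) : K p = k := by
  have h3 := K_le p h1
  rcases Nat.lt_or_ge (K p) k with h' | h'
  · have := h2 _ h'
    have := K_spec p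
    omega
  · omega

theorem K_pos (p : Int) (hp : 1 ≤ p) : 1 ≤ K p := by
  rcases Nat.eq_zero_or_pos (K p) with h | h
  · have := K_spec p; rw [h] at this; simp [tri] at this; omega
  · omega

-- the closed-form state of A's machine at sequential_number = q
def secOf (q : Int) : Int := (tri (K q) : Int) - q + 1
def lenOf (q : Int) : Int := (K q : Int) + 1

-- floordiv bridge: the ports' m*(m+1)//2 is tri m
theorem floordiv_tri (m : Int) (hm : 0 ≤ m) :
    PySem.Int.floordiv (m * (m + 1)) 2 = (tri m.toNat : Int) := by
  obtain ⟨n, rfl⟩ := Int.eq_ofNat_of_zero_le hm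
  have h1 : ((n : Int)) * ((n : Int) + 1) = ((n * (n + 1) : Nat) : Int) := by push_cast; ring
  have h2 : ((2 : Int)) = ((2 : Nat) : Int) := rfl
  rw [h1, h2, PySem.Int.floordiv_natCast, tri_div, Int.toNat_natCast]

-- one step of A's machine advances the closed-form state
theorem step_secOf (q : Int) (hq : 1 ≤ q) :
    iterate_spare_number (secOf q) (lenOf q) = (secOf (q + 1), lenOf (q + 1)) := by
  have hs := K_spec q
  rcases eq_or_lt_of_le hs with he | hl
  · -- tri (K q) = q : block boundary, sec = 1
    have hK : K (q + 1) = K q + 1 := by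
      apply K_eq
      · simp only [tri]; push_cast; omega
      · intro j hj
        have : tri j ≤ tri (K q) := tri_mono (by omega)
        omega
    simp only [iterate_spare_number, secOf, lenOf, hK, tri]
    rw [if_pos (by omega)]
    simp only [Prod.mk.injEq]
    constructor <;> (push_cast; omega)
  · -- tri (K q) > q : middle of block, sec > 1
    have hK : K (q + 1) = K q := by
      apply K_eq
      · omega
      · intro j hj
        have := K_min q hj
        omega
    simp only [iterate_spare_number, secOf, lenOf, hK]
    rw [if_neg (by omega), if_pos (by omega)]
    simp only [Prod.mk.injEq]
    exact ⟨by omega, trivial⟩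

-- A's loop from state q reaches the closed-form state at p
theorem loop_closed (p : Int) (hp : 1 ≤ p) :
    ∀ (fuel : Nat) (q : Int), 1 ≤ q → q ≤ p → (p - q).toNat ≤ fuel →
      csn_loop fuel q (secOf q) (lenOf q) p = (secOf p, lenOf p) := by
  intro fuel
  induction fuel with
  | zero =>
    intro q h1 h2 h3
    have : q = p := by omega
    subst this; rfl
  | succ f ih =>
    intro q h1 h2 h3
    rcases eq_or_lt_of_le h2 with he | hl
    · subst he
      simp [csn_loop]
    · have hstep := step_secOf q h1
      simp only [csn_loop]
      rw [if_pos ⟨by omega, by omega⟩, hstep]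
      exact ih (q + 1) (by omega) (by omega) (by omega)

theorem K_one : K 1 = 1 := by
  apply K_eq
  · simp [tri]
  · intro j hj
    have : j = 0 := by omega
    subst this; simp [tri]

-- B's binary search converges to K p
theorem bsearch_closed (p : Int) :
    ∀ (fuel : Nat) (lo hi : Int), 0 ≤ lo → lo ≤ (K p : Int) → (K p : Int) ≤ hi →
      (hi - lo).toNat ≤ fuel → csn_bsearch fuel lo hi p = (K p : Int) := by
  intro fuel
  induction fuel with
  | zero =>
    intro lo hi h0 h1 h2 h3
    simp only [csn_bsearch]; omega
  | succ f ih =>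
    intro lo hi h0 h1 h2 h3
    by_cases hlt : lo < hi
    · simp only [csn_bsearch]
      rw [if_pos hlt]
      have hmid : lo ≤ PySem.Int.floordiv (lo + hi) 2 ∧
          PySem.Int.floordiv (lo + hi) 2 < hi := by
        rw [PySem.Int.floordiv_eq_ediv_of_pos (by omega)]
        omega
      set mid := PySem.Int.floordiv (lo + hi) 2 with hmiddef
      have htri := floordiv_tri mid (by omega)
      by_cases hc : PySem.Int.floordiv (mid * (mid + 1)) 2 ≥ p
      · rw [if_pos hc]
        have hKle : (K p : Int) ≤ mid := by
          have := K_le p (by omega : p ≤ (tri mid.toNat : Int))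
          omega
        exact ih lo mid (by omega) h1 hKle (by omega)
      · rw [if_neg hc]
        have hKgt : mid < (K p : Int) := by
          by_contra hco
          have hle : K p ≤ mid.toNat := by omega
          have := tri_mono hle
          have := K_spec p
          omega
        exact ih (mid + 1) hi (by omega) (by omega) h2 (by omega)
    · simp only [csn_bsearch]
      rw [if_neg hlt]; omega

-- ===== VERDICT (by name: the statement is the Claim_ definition above) =====
theorem construct_spare_number_spec : Claim_equal_construct_spare_number := by
  intro position _ hpre
  unfold Spec_construct_spare_number
  unfold Pre_construct_spare_number at hpre
  rcases eq_or_lt_of_le hpre with h0 | h1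
  · subst h0
    decide
  · have hp : 1 ≤ position := by omega
    -- A's side
    have hinit1 : secOf 1 = 1 := by simp [secOf, K_one, tri]
    have hinit2 : lenOf 1 = 2 := by simp [lenOf, K_one]
    have hA : construct_spare_number position = [0, secOf position, lenOf position] := by
      have hloop := loop_closed position hp position.toNat 1 (by omega) hp (by omega)
      rw [hinit1, hinit2] at hloop
      unfold construct_spare_number
      rw [hloop]
    -- B's side
    have hK1 : (1 : Int) ≤ (K position : Int) := by
      have := K_pos position hp; omega
    have hKp : (K position : Int) ≤ position := by
      have h1' : position ≤ (tri position.toNat : Int) := by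
        have := tri_ge_self position.toNat; omega
      have := K_le position h1'
      omega
    have hB : construct_spare_number_alt position = [0, secOf position, lenOf position] := by
      unfold construct_spare_number_alt
      rw [if_neg (by omega)]
      rw [bsearch_closed position (position - 1).toNat 1 position (by omega) hK1 hKp (by omega)]
      have htri := floordiv_tri (K position : Int) (by omega)
      simp only [Int.toNat_natCast] at htri
      show [0, PySem.Int.floordiv ((K position : Int) * ((K position : Int) + 1)) 2 - position + 1,
        (K position : Int) + 1] = [0, secOf position, lenOf position]
      rw [htri]
      simp [secOf, lenOf]
    rw [hA, hB]
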